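-- pv_equiv track=rewrite | github.com/maksverver/AdventOfCode | 2024/21-alt.py | ExpandIterative
-- ===== SOURCE A (Python) =====
-- keypads = [
--     [
--         '789',
--         '456',
--         '123',
--         ' 0A',
--     ],
--     [
--         ' ^A',
--         '<v>',
--     ],
-- ]
--
-- def GetPath(keypad_id, src, dst):
--     keypad = keypads[keypad_id]
--     for r, row in enumerate(keypad):
--          for c, ch in enumerate(row):
--             if ch == src: r1, c1 = r, c
--             if ch == dst: r2, c2 = r, c
--     dr = r2 - r1
--     dc = c2 - c1
--     horiz = '<>'[dc > 0] * abs(dc)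
--     verti = '^v'[dr > 0] * abs(dr)
--     if dr == 0: return horiz
--     if dc == 0: return verti
--     if keypad[r2][c1] == ' ': return horiz + verti  # can't go vertical first
--     if keypad[r1][c2] == ' ': return verti + horiz  # can't go horizontal first
--     # This is the secret sauce. These results have been determined empirically.
--     if dr < 0 and dc < 0: return horiz + verti  # prefer "<v" over "v<"
--     if dr < 0 and dc > 0: return verti + horiz  # prefer "v>" over ">v"
--     if dr > 0 and dc < 0: return horiz + verti  # prefer "<v" over "v<"
--     if dr > 0 and dc > 0: return verti + horiz  # prefer "v>" over ">v"
--
-- def ExpandIterative(code, robots):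
--     s = code
--     for level in range(robots + 1):
--         last = 'A'
--         t = ''
--         for ch in s:
--             t += GetPath(level > 0, last, ch) + 'A'
--             last = ch
--         s = t
--     return t
-- ===== SOURCE B (Python) =====
-- # B: expands the numeric level once, then recurses depth-first over the
-- # pair-expansion tree (each segment ends in 'A', so 'last' resets per segment);
-- # key positions come from precomputed dicts instead of scanning the keypad.
-- NUM = {ch: (r, c) for r, row in enumerate(['789', '456', '123', ' 0A'])
--        for c, ch in enumerate(row)}
-- DIR = {ch: (r, c) for r, row in enumerate([' ^A', '<v>'])
--        for c, ch in enumerate(row)}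
--
--
-- def _path(pos, gap, src, dst):
--     r1, c1 = pos[src]
--     r2, c2 = pos[dst]
--     dr = r2 - r1
--     dc = c2 - c1
--     horiz = ('>' if dc > 0 else '<') * abs(dc)
--     verti = ('v' if dr > 0 else '^') * abs(dr)
--     if dr == 0:
--         return horiz
--     if dc == 0:
--         return verti
--     if (r2, c1) == gap:
--         return horiz + verti  # can't go vertical first
--     if (r1, c2) == gap:
--         return verti + horiz  # can't go horizontal first
--     return horiz + verti if dc < 0 else verti + horiz
--
--
-- def _expand_dir(s, depth):
--     if depth <= 0:
--         return s
--     parts = []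
--     last = 'A'
--     for ch in s:
--         parts.append(_expand_dir(_path(DIR, (0, 0), last, ch) + 'A', depth - 1))
--         last = ch
--     return ''.join(parts)
--
--
-- def ExpandIterative(code, robots):
--     parts = []
--     last = 'A'
--     for ch in code:
--         parts.append(_path(NUM, (3, 0), last, ch) + 'A')
--         last = ch
--     return _expand_dir(''.join(parts), robots)
-- ===== Notes on version B (the rewrite author's own statement) =====
-- stated objective: alternative
-- what changed: B replaces A's breadth-first level-by-level rebuild (robots+1 full passes over ever-longer strings, re-scanning the keypad grid for every key pair) with a single numeric-keypad expansion followed by a depth-first recursion over the pair-expansion tree, looking key positions up in precomputed position dictionaries.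
import Mathlib
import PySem

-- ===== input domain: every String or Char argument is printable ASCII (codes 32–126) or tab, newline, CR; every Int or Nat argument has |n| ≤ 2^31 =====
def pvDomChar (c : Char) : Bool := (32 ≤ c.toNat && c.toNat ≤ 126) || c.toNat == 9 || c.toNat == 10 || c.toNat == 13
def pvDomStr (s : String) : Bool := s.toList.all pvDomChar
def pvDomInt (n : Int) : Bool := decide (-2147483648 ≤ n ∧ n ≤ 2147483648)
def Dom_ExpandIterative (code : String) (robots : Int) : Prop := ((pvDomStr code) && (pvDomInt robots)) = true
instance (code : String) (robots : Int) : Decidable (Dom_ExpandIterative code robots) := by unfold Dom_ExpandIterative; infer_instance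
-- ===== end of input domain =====

-- B expands the numeric level once and then recurses depth-first over the
-- pair-expansion tree with precomputed position dictionaries, instead of A's
-- breadth-first level-by-level rebuild with a keypad scan per pair (objective: alternative).

-- ===== PORT A =====
-- keypads[0] and keypads[1] as lists of rows of characters
def pvKeypadNum : List (List Char) :=
  [['7','8','9'], ['4','5','6'], ['1','2','3'], [' ','0','A']]
def pvKeypadDir : List (List Char) :=
  [[' ','^','A'], ['<','v','>']]

-- GetPath; `none` = the Python raises (unbound r1/c1/r2/c2, or the fall-through return None)
def pvGetPath (kid : Bool) (src dst : Char) : Option (List Char) :=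
  let keypad := if kid then pvKeypadDir else pvKeypadNum
  let st := (PySem.List.enumerate keypad 0).foldl (fun st rrow =>
      (PySem.List.enumerate rrow.2 0).foldl (fun st cch =>
        ((if cch.2 = src then some (rrow.1, cch.1) else st.1),
         (if cch.2 = dst then some (rrow.1, cch.1) else st.2))) st)
      ((none, none) : Option (Int × Int) × Option (Int × Int))
  match st with
  | (some (r1, c1), some (r2, c2)) =>
    let dr := r2 - r1
    let dc := c2 - c1
    let horiz := List.replicate dc.natAbs (if dc > 0 then '>' else '<')
    let verti := List.replicate dr.natAbs (if dr > 0 then 'v' else '^')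
    if dr = 0 then some horiz
    else if dc = 0 then some verti
    else match PySem.List.pyGet? keypad r2 with
      | none => none
      | some row2 => match PySem.List.pyGet? row2 c1 with
        | none => none
        | some x =>
          if x = ' ' then some (horiz ++ verti)
          else match PySem.List.pyGet? keypad r1 with
            | none => none
            | some row1 => match PySem.List.pyGet? row1 c2 with
              | none => none
              | some y =>
                if y = ' ' then some (verti ++ horiz)
                else if dr < 0 ∧ dc < 0 then some (horiz ++ verti)
                else if dr < 0 ∧ dc > 0 then some (verti ++ horiz)
                else if dr > 0 ∧ dc < 0 then some (horiz ++ verti)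
                else if dr > 0 ∧ dc > 0 then some (verti ++ horiz)
                else none
  | _ => none

-- inner `for ch in s` loop; state = (last, t), `none` = raised
def pvAccA (kid : Bool) (acc : Option (Char × List Char)) (ch : Char) :
    Option (Char × List Char) :=
  match acc with
  | none => none
  | some (last, t) =>
    match pvGetPath kid last ch with
    | none => none
    | some p => some (ch, t ++ p ++ ['A'])

def pvLevelA (kid : Bool) (s : List Char) : Option (List Char) :=
  (s.foldl (pvAccA kid) (some ('A', []))).map (·.2)

-- `for level in range(robots+1)`; third argument = t (none while still unbound)
def pvLoop : List Int → List Char → Option (List Char) → Option (List Char)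
  | [], _, t => t
  | lv :: rest, s, _ =>
    match pvLevelA (decide (lv > 0)) s with
    | none => none
    | some t' => pvLoop rest t' (some t')

def ExpandIterative (code : String) (robots : Int) : String :=
  match pvLoop (PySem.List.pyRange 0 (robots + 1) 1) code.toList none with
  | some t => String.ofList t
  | none => ""

-- ===== PORT B =====
-- position dictionaries (the dict comprehensions)
def pvPosDict (rows : List (List Char)) : PySem.Dict Char (Int × Int) :=
  (PySem.List.enumerate rows 0).foldl (fun d rrow =>
    (PySem.List.enumerate rrow.2 0).foldl (fun d cch => d.insert cch.2 (rrow.1, cch.1)) d)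
    PySem.Dict.empty
def pvNumPos : PySem.Dict Char (Int × Int) :=
  pvPosDict [['7','8','9'], ['4','5','6'], ['1','2','3'], [' ','0','A']]
def pvDirPos : PySem.Dict Char (Int × Int) :=
  pvPosDict [[' ','^','A'], ['<','v','>']]

-- _path; `none` = KeyError
def pvPath (pos : PySem.Dict Char (Int × Int)) (gap : Int × Int) (src dst : Char) :
    Option (List Char) :=
  match pos.get? src, pos.get? dst with
  | some (r1, c1), some (r2, c2) =>
    let dr := r2 - r1
    let dc := c2 - c1
    let horiz := List.replicate dc.natAbs (if dc > 0 then '>' else '<')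
    let verti := List.replicate dr.natAbs (if dr > 0 then 'v' else '^')
    if dr = 0 then some horiz
    else if dc = 0 then some verti
    else if (r2, c1) = gap then some (horiz ++ verti)
    else if (r1, c2) = gap then some (verti ++ horiz)
    else if dc < 0 then some (horiz ++ verti) else some (verti ++ horiz)
  | _, _ => none

-- _expand_dir; depth as fuel (the Python tests depth <= 0 and recurses on depth-1)
def pvExpandDir : Nat → List Char → Option (List Char)
  | 0, s => some s
  | d+1, s =>
    (s.foldl (fun acc ch =>
      match acc with
      | none => none
      | some (last, parts) =>
        match pvPath pvDirPos (0, 0) last ch with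
        | none => none
        | some p =>
          match pvExpandDir d (p ++ ['A']) with
          | none => none
          | some e => some (ch, parts ++ [e]))
      (some ('A', ([] : List (List Char))))).map (fun st => st.2.flatten)

-- the level-0 loop building `parts`
def pvInitB (code : List Char) : Option (List (List Char)) :=
  (code.foldl (fun acc ch =>
    match acc with
    | none => none
    | some (last, parts) =>
      match pvPath pvNumPos (3, 0) last ch with
      | none => none
      | some p => some (ch, parts ++ [p ++ ['A']]))
    (some ('A', ([] : List (List Char))))).map (·.2)

def ExpandIterative_alt (code : String) (robots : Int) : String :=
  match pvInitB code.toList with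
  | none => ""
  | some parts =>
    match pvExpandDir robots.toNat parts.flatten with
    | none => ""
    | some r => String.ofList r

-- ===== PRECONDITION & SPEC =====
-- Pre_ excludes exactly the inputs on which the Python A raises UnboundLocalError:
-- robots < 0 (the level loop never runs, t stays unbound) and codes containing a
-- character that is not on the numeric keypad (GetPath never binds its coordinates).
def Pre_ExpandIterative (code : String) (robots : Int) : Prop :=
  0 ≤ robots ∧
    code.toList.all
      (fun c => ([' ','0','1','2','3','4','5','6','7','8','9','A'] : List Char).contains c) = true
instance (code : String) (robots : Int) : Decidable (Pre_ExpandIterative code robots) := by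
  unfold Pre_ExpandIterative; infer_instance

def pvWitness_ExpandIterative : String × Int := ("0A", 1)

def Spec_ExpandIterative (code : String) (robots : Int) (out : String) : Prop :=
  out = ExpandIterative_alt code robots
instance (code : String) (robots : Int) (out : String) :
    Decidable (Spec_ExpandIterative code robots out) := by
  unfold Spec_ExpandIterative; infer_instance

-- ===== CLAIM (what is proved, stated in full; the proofs are below) =====
def Claim_equal_ExpandIterative : Prop :=
  ∀ (code : String) (robots : Int), Dom_ExpandIterative code robots →
    Pre_ExpandIterative code robots →
    Spec_ExpandIterative code robots (ExpandIterative code robots)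

-- ===== LEMMAS AND PROOFS =====

-- character alphabets
def pvDirChars : List Char := ['<','>','^','v','A']
def pvNumChars : List Char := [' ','0','1','2','3','4','5','6','7','8','9','A']

-- literal tables of the (finitely many) key-to-key paths, used to evaluate both
-- ports' path computations once and for all
def pathTabNList : List ((Char × Char) × List Char) := [
  ((' ',' '), []),
  ((' ','0'), ['>']),
  ((' ','1'), ['^']),
  ((' ','2'), ['^','>']),
  ((' ','3'), ['^','>','>']),
  ((' ','4'), ['^','^']),
  ((' ','5'), ['^','^','>']),
  ((' ','6'), ['^','^','>','>']),
  ((' ','7'), ['^','^','^']),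
  ((' ','8'), ['^','^','^','>']),
  ((' ','9'), ['^','^','^','>','>']),
  ((' ','A'), ['>','>']),
  (('0',' '), ['<']),
  (('0','0'), []),
  (('0','1'), ['^','<']),
  (('0','2'), ['^']),
  (('0','3'), ['^','>']),
  (('0','4'), ['^','^','<']),
  (('0','5'), ['^','^']),
  (('0','6'), ['^','^','>']),
  (('0','7'), ['^','^','^','<']),
  (('0','8'), ['^','^','^']),
  (('0','9'), ['^','^','^','>']),
  (('0','A'), ['>']),
  (('1',' '), ['v']),
  (('1','0'), ['>','v']),
  (('1','1'), []),
  (('1','2'), ['>']),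
  (('1','3'), ['>','>']),
  (('1','4'), ['^']),
  (('1','5'), ['^','>']),
  (('1','6'), ['^','>','>']),
  (('1','7'), ['^','^']),
  (('1','8'), ['^','^','>']),
  (('1','9'), ['^','^','>','>']),
  (('1','A'), ['>','>','v']),
  (('2',' '), ['<','v']),
  (('2','0'), ['v']),
  (('2','1'), ['<']),
  (('2','2'), []),
  (('2','3'), ['>']),
  (('2','4'), ['<','^']),
  (('2','5'), ['^']),
  (('2','6'), ['^','>']),
  (('2','7'), ['<','^','^']),
  (('2','8'), ['^','^']),
  (('2','9'), ['^','^','>']),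
  (('2','A'), ['v','>']),
  (('3',' '), ['<','<','v']),
  (('3','0'), ['<','v']),
  (('3','1'), ['<','<']),
  (('3','2'), ['<']),
  (('3','3'), []),
  (('3','4'), ['<','<','^']),
  (('3','5'), ['<','^']),
  (('3','6'), ['^']),
  (('3','7'), ['<','<','^','^']),
  (('3','8'), ['<','^','^']),
  (('3','9'), ['^','^']),
  (('3','A'), ['v']),
  (('4',' '), ['v','v']),
  (('4','0'), ['>','v','v']),
  (('4','1'), ['v']),
  (('4','2'), ['v','>']),
  (('4','3'), ['v','>','>']),
  (('4','4'), []),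
  (('4','5'), ['>']),
  (('4','6'), ['>','>']),
  (('4','7'), ['^']),
  (('4','8'), ['^','>']),
  (('4','9'), ['^','>','>']),
  (('4','A'), ['>','>','v','v']),
  (('5',' '), ['<','v','v']),
  (('5','0'), ['v','v']),
  (('5','1'), ['<','v']),
  (('5','2'), ['v']),
  (('5','3'), ['v','>']),
  (('5','4'), ['<']),
  (('5','5'), []),
  (('5','6'), ['>']),
  (('5','7'), ['<','^']),
  (('5','8'), ['^']),
  (('5','9'), ['^','>']),
  (('5','A'), ['v','v','>']),
  (('6',' '), ['<','<','v','v']),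
  (('6','0'), ['<','v','v']),
  (('6','1'), ['<','<','v']),
  (('6','2'), ['<','v']),
  (('6','3'), ['v']),
  (('6','4'), ['<','<']),
  (('6','5'), ['<']),
  (('6','6'), []),
  (('6','7'), ['<','<','^']),
  (('6','8'), ['<','^']),
  (('6','9'), ['^']),
  (('6','A'), ['v','v']),
  (('7',' '), ['v','v','v']),
  (('7','0'), ['>','v','v','v']),
  (('7','1'), ['v','v']),
  (('7','2'), ['v','v','>']),
  (('7','3'), ['v','v','>','>']),
  (('7','4'), ['v']),
  (('7','5'), ['v','>']),
  (('7','6'), ['v','>','>']),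
  (('7','7'), []),
  (('7','8'), ['>']),
  (('7','9'), ['>','>']),
  (('7','A'), ['>','>','v','v','v']),
  (('8',' '), ['<','v','v','v']),
  (('8','0'), ['v','v','v']),
  (('8','1'), ['<','v','v']),
  (('8','2'), ['v','v']),
  (('8','3'), ['v','v','>']),
  (('8','4'), ['<','v']),
  (('8','5'), ['v']),
  (('8','6'), ['v','>']),
  (('8','7'), ['<']),
  (('8','8'), []),
  (('8','9'), ['>']),
  (('8','A'), ['v','v','v','>']),
  (('9',' '), ['<','<','v','v','v']),
  (('9','0'), ['<','v','v','v']),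
  (('9','1'), ['<','<','v','v']),
  (('9','2'), ['<','v','v']),
  (('9','3'), ['v','v']),
  (('9','4'), ['<','<','v']),
  (('9','5'), ['<','v']),
  (('9','6'), ['v']),
  (('9','7'), ['<','<']),
  (('9','8'), ['<']),
  (('9','9'), []),
  (('9','A'), ['v','v','v']),
  (('A',' '), ['<','<']),
  (('A','0'), ['<']),
  (('A','1'), ['^','<','<']),
  (('A','2'), ['<','^']),
  (('A','3'), ['^']),
  (('A','4'), ['^','^','<','<']),
  (('A','5'), ['<','^','^']),
  (('A','6'), ['^','^']),
  (('A','7'), ['^','^','^','<','<']),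
  (('A','8'), ['<','^','^','^']),
  (('A','9'), ['^','^','^']),
  (('A','A'), [])]

def pathTabN (l c : Char) : List Char := ((pathTabNList.lookup (l, c)).getD [])

def pathTabDList : List ((Char × Char) × List Char) := [
  (('<','<'), []),
  (('<','>'), ['>','>']),
  (('<','^'), ['>','^']),
  (('<','v'), ['>']),
  (('<','A'), ['>','>','^']),
  (('>','<'), ['<','<']),
  (('>','>'), []),
  (('>','^'), ['<','^']),
  (('>','v'), ['<']),
  (('>','A'), ['^']),
  (('^','<'), ['v','<']),
  (('^','>'), ['v','>']),
  (('^','^'), []),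
  (('^','v'), ['v']),
  (('^','A'), ['>']),
  (('v','<'), ['<']),
  (('v','>'), ['>']),
  (('v','^'), ['^']),
  (('v','v'), []),
  (('v','A'), ['^','>']),
  (('A','<'), ['v','<','<']),
  (('A','>'), ['v']),
  (('A','^'), ['<']),
  (('A','v'), ['<','v']),
  (('A','A'), [])]

def pathTabD (l c : Char) : List Char := ((pathTabDList.lookup (l, c)).getD [])

-- one expansion segment (the path between two keys, then 'A')
def dSeg (l c : Char) : List Char := (pvPath pvDirPos (0,0) l c).getD [] ++ ['A']
def nSeg (l c : Char) : List Char := (pvPath pvNumPos (3,0) l c).getD [] ++ ['A']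

-- concatenation of segments / the list of segments along a string
def segsFrom (seg : Char → Char → List Char) : Char → List Char → List Char
  | _, [] => []
  | l, c :: r => seg l c ++ segsFrom seg c r

def partsFrom (g : Char → Char → List Char) : Char → List Char → List (List Char)
  | _, [] => []
  | l, c :: r => g l c :: partsFrom g c r

-- n directional expansion rounds, breadth-first
def iterStep : Nat → List Char → List Char
  | 0, s => s
  | n+1, s => iterStep n (segsFrom dSeg 'A' s)

-- finite checks: both ports' path computations match the literal tables
set_option maxRecDepth 8000 in
lemma dirA_eq : ∀ l ∈ pvDirChars, ∀ c ∈ pvDirChars,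
    pvGetPath true l c = some (pathTabD l c) := by
  intro l hl c hc; fin_cases hl <;> fin_cases hc <;> exact (by decide)

set_option maxRecDepth 8000 in
lemma dirB_eq : ∀ l ∈ pvDirChars, ∀ c ∈ pvDirChars,
    pvPath pvDirPos (0,0) l c = some (pathTabD l c) := by
  intro l hl c hc; fin_cases hl <;> fin_cases hc <;> exact (by decide)

set_option maxRecDepth 8000 in
lemma numA_eq : ∀ l ∈ pvNumChars, ∀ c ∈ pvNumChars,
    pvGetPath false l c = some (pathTabN l c) := by
  intro l hl c hc; fin_cases hl <;> fin_cases hc <;> exact (by decide)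

set_option maxRecDepth 8000 in
lemma numB_eq : ∀ l ∈ pvNumChars, ∀ c ∈ pvNumChars,
    pvPath pvNumPos (3,0) l c = some (pathTabN l c) := by
  intro l hl c hc; fin_cases hl <;> fin_cases hc <;> exact (by decide)

lemma pvLookup_mem {α β : Type} [BEq α] [LawfulBEq α] :
    ∀ (l : List (α × β)) (k : α) (v : β), List.lookup k l = some v → (k, v) ∈ l := by
  intro l
  induction l with
  | nil => intro k v h; simp [List.lookup] at h
  | cons a t ih =>
    intro k v h
    obtain ⟨a1, a2⟩ := a
    rw [List.lookup] at h
    by_cases hk : k == a1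
    · simp [hk] at h
      have hk' : k = a1 := eq_of_beq hk
      subst hk'; subst h
      exact List.mem_cons_self
    · simp [hk] at h
      exact List.mem_cons_of_mem _ (ih k v h)

lemma tabDList_ok_bool :
    (pathTabDList.all (fun e => e.2.all (fun x => decide (x ∈ pvDirChars)))) = true := by rfl

lemma tabNList_ok_bool :
    (pathTabNList.all (fun e => e.2.all (fun x => decide (x ∈ pvDirChars)))) = true := by rfl

lemma tabDList_ok : ∀ e ∈ pathTabDList, ∀ x ∈ e.2, x ∈ pvDirChars := by
  have h := tabDList_ok_bool
  rw [List.all_eq_true] at h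
  intro e he x hx
  have h2 := h e he
  rw [List.all_eq_true] at h2
  exact of_decide_eq_true (h2 x hx)

lemma tabNList_ok : ∀ e ∈ pathTabNList, ∀ x ∈ e.2, x ∈ pvDirChars := by
  have h := tabNList_ok_bool
  rw [List.all_eq_true] at h
  intro e he x hx
  have h2 := h e he
  rw [List.all_eq_true] at h2
  exact of_decide_eq_true (h2 x hx)

lemma tabD_ok (l : Char) (_ : l ∈ pvDirChars) (c : Char) (_ : c ∈ pvDirChars) :
    ∀ x ∈ pathTabD l c, x ∈ pvDirChars := by
  intro x hx
  unfold pathTabD at hx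
  cases h : pathTabDList.lookup (l, c) with
  | none => rw [h] at hx; simp at hx
  | some v =>
    rw [h] at hx; simp only [Option.getD_some] at hx
    exact tabDList_ok _ (pvLookup_mem _ _ _ h) x hx

lemma tabN_ok (l : Char) (_ : l ∈ pvNumChars) (c : Char) (_ : c ∈ pvNumChars) :
    ∀ x ∈ pathTabN l c, x ∈ pvDirChars := by
  intro x hx
  unfold pathTabN at hx
  cases h : pathTabNList.lookup (l, c) with
  | none => rw [h] at hx; simp at hx
  | some v =>
    rw [h] at hx; simp only [Option.getD_some] at hx
    exact tabNList_ok _ (pvLookup_mem _ _ _ h) x hx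

-- the segments in terms of the tables
lemma dSeg_eq (l c : Char) (hl : l ∈ pvDirChars) (hc : c ∈ pvDirChars) :
    dSeg l c = pathTabD l c ++ ['A'] := by
  unfold dSeg; rw [dirB_eq l hl c hc, Option.getD_some]

lemma nSeg_eq (l c : Char) (hl : l ∈ pvNumChars) (hc : c ∈ pvNumChars) :
    nSeg l c = pathTabN l c ++ ['A'] := by
  unfold nSeg; rw [numB_eq l hl c hc, Option.getD_some]

lemma dSeg_ok (l c : Char) (hl : l ∈ pvDirChars) (hc : c ∈ pvDirChars) :
    ∀ x ∈ dSeg l c, x ∈ pvDirChars := by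
  intro x hx
  rw [dSeg_eq l c hl hc] at hx
  rcases List.mem_append.mp hx with h | h
  · exact tabD_ok l hl c hc x h
  · simp at h; subst h; decide

lemma nSeg_ok (l c : Char) (hl : l ∈ pvNumChars) (hc : c ∈ pvNumChars) :
    ∀ x ∈ nSeg l c, x ∈ pvDirChars := by
  intro x hx
  rw [nSeg_eq l c hl hc] at hx
  rcases List.mem_append.mp hx with h | h
  · exact tabN_ok l hl c hc x h
  · simp at h; subst h; decide

-- getLastD helpers
lemma pvLastD_irrel (b : List Char) (d d' : Char) (h : b ≠ []) :
    b.getLastD d = b.getLastD d' := by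
  cases b with
  | nil => exact absurd rfl h
  | cons x xs => rw [List.getLastD_cons, List.getLastD_cons]

lemma pvLastD_append (a b : List Char) (d : Char) (h : b ≠ []) :
    (a ++ b).getLastD d = b.getLastD d := by
  induction a generalizing d with
  | nil => simp
  | cons x a' ih =>
    rw [List.cons_append, List.getLastD_cons, ih x, pvLastD_irrel b x d h]

-- generic fold lemmas (the two loop shapes shared by the ports)
lemma fold_str_gen (P : List Char) (seg : Char → Char → List Char)
    (f : Option (Char × List Char) → Char → Option (Char × List Char))
    (hf : ∀ last t ch, last ∈ P → ch ∈ P →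
      f (some (last, t)) ch = some (ch, t ++ seg last ch)) :
    ∀ (s : List Char) (last : Char) (t : List Char), last ∈ P → (∀ c ∈ s, c ∈ P) →
      s.foldl f (some (last, t)) = some (s.getLastD last, t ++ segsFrom seg last s) := by
  intro s
  induction s with
  | nil => intro last t _ _; simp [segsFrom]
  | cons c r ih =>
    intro last t hl hs
    have hc : c ∈ P := hs c (by simp)
    rw [List.foldl_cons, hf last t c hl hc]
    rw [ih c (t ++ seg last c) hc (fun x hx => hs x (by simp [hx]))]
    rw [List.getLastD_cons]
    simp [segsFrom]

lemma fold_parts_gen (P : List Char) (g : Char → Char → List Char)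
    (f : Option (Char × List (List Char)) → Char → Option (Char × List (List Char)))
    (hf : ∀ last parts ch, last ∈ P → ch ∈ P →
      f (some (last, parts)) ch = some (ch, parts ++ [g last ch])) :
    ∀ (s : List Char) (last : Char) (parts : List (List Char)),
      last ∈ P → (∀ c ∈ s, c ∈ P) →
      s.foldl f (some (last, parts)) = some (s.getLastD last, parts ++ partsFrom g last s) := by
  intro s
  induction s with
  | nil => intro last parts _ _; simp [partsFrom]
  | cons c r ih =>
    intro last parts hl hs
    have hc : c ∈ P := hs c (by simp)
    rw [List.foldl_cons, hf last parts c hl hc]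
    rw [ih c (parts ++ [g last c]) hc (fun x hx => hs x (by simp [hx]))]
    rw [List.getLastD_cons]
    simp [partsFrom]

lemma flatten_partsFrom (g : Char → Char → List Char) :
    ∀ (s : List Char) (l : Char), (partsFrom g l s).flatten = segsFrom g l s := by
  intro s
  induction s with
  | nil => intro l; simp [partsFrom, segsFrom]
  | cons c r ih => intro l; simp [partsFrom, segsFrom, ih]

-- segsFrom distributes over append, threading the last character
lemma segsFrom_append (seg : Char → Char → List Char) :
    ∀ (x y : List Char) (l : Char),
      segsFrom seg l (x ++ y) = segsFrom seg l x ++ segsFrom seg (x.getLastD l) y := by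
  intro x
  induction x with
  | nil => intro y l; simp [segsFrom]
  | cons c r ih => intro y l; rw [List.getLastD_cons]; simp [segsFrom, ih y c]

-- every character produced by a directional round is directional
lemma step_ok : ∀ (s : List Char) (l : Char), l ∈ pvDirChars → (∀ c ∈ s, c ∈ pvDirChars) →
    ∀ x ∈ segsFrom dSeg l s, x ∈ pvDirChars := by
  intro s
  induction s with
  | nil => intro l _ _ x hx; simp [segsFrom] at hx
  | cons c r ih =>
    intro l hl hs x hx
    simp only [segsFrom, List.mem_append] at hx
    rcases hx with hx | hx
    · exact dSeg_ok l c hl (hs c (by simp)) x hx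
    · exact ih c (hs c (by simp)) (fun z hz => hs z (by simp [hz])) x hx

-- a directional round always ends in 'A' (or is empty)
lemma step_lastA : ∀ (s : List Char) (l : Char), (segsFrom dSeg l s).getLastD 'A' = 'A' := by
  intro s
  induction s with
  | nil => intro l; simp [segsFrom]
  | cons c r ih =>
    intro l
    simp only [segsFrom]
    cases h : segsFrom dSeg c r with
    | nil => simp only [List.append_nil]
             unfold dSeg
             rw [pvLastD_append _ ['A'] 'A' (by simp)]
             simp
    | cons z zs => rw [pvLastD_append _ (z :: zs) 'A' (by simp), ← h]
                   exact ih c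

-- breadth-first rounds distribute over an 'A'-terminated split
lemma iterStep_append : ∀ (n : Nat) (x y : List Char),
    (∀ c ∈ x, c ∈ pvDirChars) → (∀ c ∈ y, c ∈ pvDirChars) → x.getLastD 'A' = 'A' →
    iterStep n (x ++ y) = iterStep n x ++ iterStep n y := by
  intro n
  induction n with
  | zero => intro x y _ _ _; simp [iterStep]
  | succ m ih =>
    intro x y hx hy hlast
    simp only [iterStep]
    rw [segsFrom_append dSeg x y 'A', hlast]
    exact ih _ _ (step_ok x 'A' (by decide) hx) (step_ok y 'A' (by decide) hy)
      (step_lastA x 'A')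

lemma dSeg_lastA (l c : Char) : (dSeg l c).getLastD 'A' = 'A' := by
  unfold dSeg
  rw [pvLastD_append _ ['A'] 'A' (by simp)]
  simp

lemma iterStep_nil : ∀ n, iterStep n [] = [] := by
  intro n
  induction n with
  | zero => rfl
  | succ m ih => simp [iterStep, segsFrom, ih]

-- depth-first collection of per-pair expansions = one breadth-first round then n more
lemma segsFrom_iter (n : Nat) : ∀ (s : List Char) (l : Char),
    l ∈ pvDirChars → (∀ c ∈ s, c ∈ pvDirChars) →
    segsFrom (fun a b => iterStep n (dSeg a b)) l s = iterStep n (segsFrom dSeg l s) := by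
  intro s
  induction s with
  | nil => intro l _ _; simp [segsFrom, iterStep_nil]
  | cons c r ih =>
    intro l hl hs
    have hc : c ∈ pvDirChars := hs c (by simp)
    simp only [segsFrom]
    rw [ih c hc (fun z hz => hs z (by simp [hz]))]
    rw [iterStep_append n (dSeg l c) (segsFrom dSeg c r)
      (dSeg_ok l c hl hc) (step_ok r c hc (fun z hz => hs z (by simp [hz])))
      (dSeg_lastA l c)]

-- B's recursion computes the breadth-first iteration
lemma expandDir_spec : ∀ (n : Nat) (s : List Char), (∀ c ∈ s, c ∈ pvDirChars) →
    pvExpandDir n s = some (iterStep n s) := by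
  intro n
  induction n with
  | zero => intro s _; simp [pvExpandDir, iterStep]
  | succ m ih =>
    intro s hs
    rw [pvExpandDir]
    rw [fold_parts_gen pvDirChars (fun a b => iterStep m (dSeg a b)) _
      (fun last parts ch hl hc => by
        simp only [dirB_eq last hl ch hc, ← dSeg_eq last ch hl hc,
          ih (dSeg last ch) (dSeg_ok last ch hl hc)])
      s 'A' [] (by decide) hs]
    simp only [Option.map_some, List.nil_append]
    rw [flatten_partsFrom, segsFrom_iter m s 'A' (by decide) hs]
    rfl

-- A's inner loop at a directional level
lemma levelA_true (s : List Char) (hs : ∀ c ∈ s, c ∈ pvDirChars) :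
    pvLevelA true s = some (segsFrom dSeg 'A' s) := by
  unfold pvLevelA
  rw [fold_str_gen pvDirChars dSeg (pvAccA true)
    (fun last t ch hl hc => by
      simp only [pvAccA, dirA_eq last hl ch hc, dSeg_eq last ch hl hc,
        List.append_assoc])
    s 'A' [] (by decide) hs]
  simp

-- A's inner loop at the numeric level
lemma levelA_false (s : List Char) (hs : ∀ c ∈ s, c ∈ pvNumChars) :
    pvLevelA false s = some (segsFrom nSeg 'A' s) := by
  unfold pvLevelA
  rw [fold_str_gen pvNumChars nSeg (pvAccA false)
    (fun last t ch hl hc => by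
      simp only [pvAccA, numA_eq last hl ch hc, nSeg_eq last ch hl hc,
        List.append_assoc])
    s 'A' [] (by decide) hs]
  simp

-- the numeric expansion is directional
lemma num_ok : ∀ (s : List Char) (l : Char), l ∈ pvNumChars → (∀ c ∈ s, c ∈ pvNumChars) →
    ∀ x ∈ segsFrom nSeg l s, x ∈ pvDirChars := by
  intro s
  induction s with
  | nil => intro l _ _ x hx; simp [segsFrom] at hx
  | cons c r ih =>
    intro l hl hs x hx
    simp only [segsFrom, List.mem_append] at hx
    rcases hx with hx | hx
    · exact nSeg_ok l c hl (hs c (by simp)) x hx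
    · exact ih c (hs c (by simp)) (fun z hz => hs z (by simp [hz])) x hx

-- A's level loop over positive level numbers = breadth-first iteration
lemma loop_true : ∀ (lst : List Int) (s : List Char), (∀ x ∈ lst, 0 < x) →
    (∀ c ∈ s, c ∈ pvDirChars) →
    pvLoop lst s (some s) = some (iterStep lst.length s) := by
  intro lst
  induction lst with
  | nil => intro s _ _; simp [pvLoop, iterStep]
  | cons lv rest ih =>
    intro s hpos hs
    have hlv : decide (lv > 0) = true := by
      simp [hpos lv (by simp)]
    have hs' := step_ok s 'A' (by decide) hs
    simp only [pvLoop, hlv, levelA_true s hs,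
      ih (segsFrom dSeg 'A' s) (fun x hx => hpos x (by simp [hx])) hs']
    rfl

-- B's numeric pass
lemma initB_spec (s : List Char) (hs : ∀ c ∈ s, c ∈ pvNumChars) :
    pvInitB s = some (partsFrom nSeg 'A' s) := by
  unfold pvInitB
  rw [fold_parts_gen pvNumChars nSeg _
    (fun last parts ch hl hc => by
      simp only [numB_eq last hl ch hc, ← nSeg_eq last ch hl hc])
    s 'A' [] (by decide) hs]
  simp

-- ===== VERDICT (by name: the statement is the Claim_ definition above) =====
theorem ExpandIterative_spec : Claim_equal_ExpandIterative := by
  intro code robots _ hpre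
  obtain ⟨hr, hcode⟩ := hpre
  unfold Spec_ExpandIterative ExpandIterative ExpandIterative_alt
  have hcode' : ∀ c ∈ code.toList, c ∈ pvNumChars := by
    intro c hc
    have h2 := List.all_eq_true.mp hcode c hc
    simp only [pvNumChars]
    simpa using h2
  have hdir := num_ok code.toList 'A' (by decide) hcode'
  have hrange : PySem.List.pyRange 0 (robots + 1) 1
      = 0 :: PySem.List.pyRange 1 (robots + 1) 1 := by
    rw [PySem.List.pyRange_one_cons (by omega)]
    norm_num
  have hpos : ∀ x ∈ PySem.List.pyRange 1 (robots + 1) 1, (0:Int) < x := fun x hx => by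
    have := (PySem.List.mem_pyRange_one).1 hx; omega
  have hlen : (PySem.List.pyRange 1 (robots + 1) 1).length = robots.toNat := by
    rw [PySem.List.length_pyRange_one]; omega
  have h00 : (decide ((0:Int) > 0)) = false := by decide
  rw [hrange]
  simp only [pvLoop, h00, levelA_false code.toList hcode',
    loop_true (PySem.List.pyRange 1 (robots + 1) 1) _ hpos hdir,
    initB_spec code.toList hcode', flatten_partsFrom, hlen,
    expandDir_spec robots.toNat _ hdir]
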